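-- pv_equiv track=rewrite | github.com/dosilt/Programmers-Python-dosilt | Level1/가장 많이 받은 선물.py | solution
-- ===== SOURCE A (Python) =====
-- def present_history(a, matrix, score):
--     result = []
--     for b in range(len(matrix)):
--         if a == b:
--             continue
--
--         # a -> b 가 b -> a 보다 크면 a가 받아야됨
--         if matrix[a][b] > matrix[b][a]:
--             result.append(1)
--         elif matrix[a][b] < matrix[b][a]:
--             result.append(0)
--
--         # a -> b == b -> a 같으면 score 봐야됨
--         # score map [a] > [b] 면 a 가 받아야됨
--         else:
--             if score[a] > score[b]:
--                 result.append(1)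
--             else:
--                 result.append(0)
--
--     return sum(result)
--
-- def solution(friends, gifts):
--     name_map = {name: num for num, name in enumerate(friends)}
--     matrix = [[0 for _ in range(len(friends))] for _ in range(len(friends))]
--     score = [0 for _ in range(len(friends))]
--
--     for gift in gifts:
--         a, b = gift.split()
--
--         # a가 b한테 준 선물
--         matrix[name_map[a]][name_map[b]] += 1
--
--         score[name_map[a]] += 1
--         score[name_map[b]] -= 1
--
--     answer = 0
--     for i in range(len(friends)):
--         answer = max(answer, present_history(i, matrix, score))
--
--     return answer
-- ===== SOURCE B (Python) =====
-- def solution(friends, gifts):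
--     pair = {}
--     net = {name: 0 for name in friends}
--     for gift in gifts:
--         a, b = gift.split()
--         pair[a, b] = pair.get((a, b), 0) + 1
--         net[a] += 1
--         net[b] -= 1
--     wins = {name: 0 for name in friends}
--     for i, x in enumerate(friends):
--         for y in friends[i + 1:]:
--             xy = pair.get((x, y), 0)
--             yx = pair.get((y, x), 0)
--             if xy > yx or (xy == yx and net[x] > net[y]):
--                 wins[x] += 1
--             elif yx > xy or net[y] > net[x]:
--                 wins[y] += 1
--     return max(wins.values(), default=0)
-- ===== Notes on version B (the rewrite author's own statement) =====
-- stated objective: alternative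
-- what changed: B drops A's name->index map and n x n matrix entirely: gift counts go into a dict keyed by (giver,receiver) name pairs and net scores into a name-keyed dict in one pass over gifts, then a single pass over unordered name pairs credits each matchup's winner in a wins dict and returns max(wins.values(), default=0), instead of A's per-person full-row rescan over a matrix.
-- outside the precondition, e.g. on solution(['a', 'a', 'b', 'b'], ['a b']): A returns 3, B returns 4
import Mathlib
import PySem

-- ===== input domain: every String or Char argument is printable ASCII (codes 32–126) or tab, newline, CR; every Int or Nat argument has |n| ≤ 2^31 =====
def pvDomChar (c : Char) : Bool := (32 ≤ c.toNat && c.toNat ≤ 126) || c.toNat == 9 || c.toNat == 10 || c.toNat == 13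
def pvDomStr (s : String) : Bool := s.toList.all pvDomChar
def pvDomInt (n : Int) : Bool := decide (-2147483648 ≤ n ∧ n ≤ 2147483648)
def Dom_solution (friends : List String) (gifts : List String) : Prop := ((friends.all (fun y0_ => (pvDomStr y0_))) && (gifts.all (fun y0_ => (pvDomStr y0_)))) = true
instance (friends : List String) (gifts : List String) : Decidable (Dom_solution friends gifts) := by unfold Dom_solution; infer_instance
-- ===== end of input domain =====

-- B drops A's name→index map and n×n matrix: gift counts live in a dict keyed by (giver,receiver)
-- name pairs, net scores and wins in name-keyed dicts, one pass over unordered name pairs; same value.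

-- ===== PORT A =====
-- name_map = {name: num for num, name in enumerate(friends)}
def solutionNameMap (friends : List String) : PySem.Dict String Int :=
  (PySem.List.enumerate friends 0).foldl (fun d p => d.insert p.2 p.1) PySem.Dict.empty

-- body of A's 'for gift in gifts' loop (matrix/score updates); skips are where Python raises
def solutionGiftStep (nm : PySem.Dict String Int)
    (st : List (List Int) × List Int) (gift : String) : List (List Int) × List Int :=
  match PySem.Str.split₀ gift with
  | [a, b] =>
    match nm.get? a, nm.get? b with
    | some ia, some ib =>
        let matrix := PySem.List.pySetD st.1 ia
          (PySem.List.pySetD (PySem.List.pyGetD st.1 ia []) ib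
            (PySem.List.pyGetD (PySem.List.pyGetD st.1 ia []) ib 0 + 1))
        let score := PySem.List.pySetD st.2 ia (PySem.List.pyGetD st.2 ia 0 + 1)
        let score := PySem.List.pySetD score ib (PySem.List.pyGetD score ib 0 - 1)
        (matrix, score)
    | _, _ => st
  | _ => st

-- present_history(a, matrix, score)
def presentHistory (a : Int) (matrix : List (List Int)) (score : List Int) : Int :=
  ((PySem.List.pyRange 0 (matrix.length : Int) 1).foldl (fun result b =>
    if a = b then result
    else if PySem.List.pyGetD (PySem.List.pyGetD matrix a []) b 0 >
            PySem.List.pyGetD (PySem.List.pyGetD matrix b []) a 0 then result ++ [(1 : Int)]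
    else if PySem.List.pyGetD (PySem.List.pyGetD matrix a []) b 0 <
            PySem.List.pyGetD (PySem.List.pyGetD matrix b []) a 0 then result ++ [(0 : Int)]
    else if PySem.List.pyGetD score a 0 > PySem.List.pyGetD score b 0 then result ++ [(1 : Int)]
    else result ++ [(0 : Int)]) []).sum

def solution (friends : List String) (gifts : List String) : Int :=
  let nm := solutionNameMap friends
  let n : Int := (friends.length : Int)
  let matrix0 := (PySem.List.pyRange 0 n 1).map
    (fun _ => (PySem.List.pyRange 0 n 1).map (fun _ => (0 : Int)))
  let score0 := (PySem.List.pyRange 0 n 1).map (fun _ => (0 : Int))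
  let st := gifts.foldl (solutionGiftStep nm) (matrix0, score0)
  (PySem.List.pyRange 0 n 1).foldl
    (fun answer i => max answer (presentHistory i st.1 st.2)) 0

-- ===== PORT B =====
-- body of B's 'for gift in gifts' loop: pair[a,b]=pair.get((a,b),0)+1; net[a]+=1; net[b]-=1
-- (the skip branches are exactly where Python raises: bad split / missing key)
def solutionAltGiftStep
    (st : PySem.Dict (String × String) Int × PySem.Dict String Int) (gift : String) :
    PySem.Dict (String × String) Int × PySem.Dict String Int :=
  match PySem.Str.split₀ gift with
  | [a, b] =>
    let pair := st.1.insert (a, b) (st.1.getD (a, b) 0 + 1)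
    match st.2.get? a with
    | some va =>
      let net := st.2.insert a (va + 1)
      match net.get? b with
      | some vb => (pair, net.insert b (vb - 1))
      | none => st
    | none => st
  | _ => st

-- body of B's inner matchup loop for fixed x against y
def solutionAltMatch (pair : PySem.Dict (String × String) Int) (net : PySem.Dict String Int)
    (x : String) (w : PySem.Dict String Int) (y : String) : PySem.Dict String Int :=
  let xy := pair.getD (x, y) 0
  let yx := pair.getD (y, x) 0
  if xy > yx ∨ (xy = yx ∧ net.getD x 0 > net.getD y 0) then w.insert x (w.getD x 0 + 1)
  else if yx > xy ∨ net.getD y 0 > net.getD x 0 then w.insert y (w.getD y 0 + 1)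
  else w

def solution_alt (friends : List String) (gifts : List String) : Int :=
  let net0 := friends.foldl (fun d name => d.insert name (0 : Int)) PySem.Dict.empty
  let st := gifts.foldl solutionAltGiftStep (PySem.Dict.empty, net0)
  let wins0 := friends.foldl (fun d name => d.insert name (0 : Int)) PySem.Dict.empty
  let wins := (PySem.List.enumerate friends 0).foldl (fun w p =>
    (PySem.List.slice friends (some (p.1 + 1)) none).foldl (solutionAltMatch st.1 st.2 p.2) w)
    wins0
  PySem.List.maxD wins.values (fun x => x) 0

-- ===== PRECONDITION & SPEC =====
-- Pre_ excludes (a) gifts that A raises on: a gift not splitting into exactly two tokens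
-- (ValueError) or with a token that is no friend's name (KeyError); and (b) duplicate friend
-- names, on which A's dict-comprehension overwrites the duplicate key and leaves accidental
-- phantom matrix rows that still compete — a defensible-corner artefact of A's implementation.
def Pre_solution (friends : List String) (gifts : List String) : Prop :=
  friends.Nodup ∧
  ∀ g ∈ gifts, (PySem.Str.split₀ g).length = 2 ∧ ∀ t ∈ PySem.Str.split₀ g, t ∈ friends

instance (friends : List String) (gifts : List String) : Decidable (Pre_solution friends gifts) := by
  unfold Pre_solution; infer_instance

def pvWitness_solution : List String × List String := (["a", "b"], ["a b", "b a", "a b"])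

def Spec_solution (friends : List String) (gifts : List String) (out : Int) : Prop := out = solution_alt friends gifts
instance (friends : List String) (gifts : List String) (out : Int) : Decidable (Spec_solution friends gifts out) := by unfold Spec_solution; infer_instance

-- ===== CLAIM (what is proved, stated in full; the proofs are below) =====
def Claim_equal_solution : Prop := ∀ (friends : List String) (gifts : List String), Dom_solution friends gifts → Pre_solution friends gifts → Spec_solution friends gifts (solution friends gifts)

-- ===== LEMMAS AND PROOFS =====

-- matrix[i][j] and score[i], Nat-indexed
def pvG (M : List (List Int)) (i j : Nat) : Int := (M.getD i []).getD j 0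
def pvS (S : List Int) (i : Nat) : Int := S.getD i 0
-- 'i receives a gift from j' under the tie rules
def pvWin (M : List (List Int)) (S : List Int) (i j : Nat) : Bool :=
  decide (pvG M i j > pvG M j i) || (decide (pvG M i j = pvG M j i) && decide (pvS S i > pvS S j))
-- number of matchups i wins among all n people
def pvW (M : List (List Int)) (S : List Int) (n i : Nat) : Nat :=
  (List.range n).countP (fun b => pvWin M S i b && decide (i ≠ b))

def pvWinner (M : List (List Int)) (S : List Int) (p : Nat × Nat) : Option Nat :=
  if pvWin M S p.1 p.2 then some p.1 else if pvWin M S p.2 p.1 then some p.2 else none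

def pvPairs (n : Nat) : List (Nat × Nat) :=
  (List.range n).flatMap (fun a => (List.range (n - (a + 1))).map (fun k => (a, a + 1 + k)))

-- B's per-matchup step on the wins dict, indexed through the names
def pvStepD (friends : List String) (M : List (List Int)) (S : List Int)
    (w : PySem.Dict String Int) (p : Nat × Nat) : PySem.Dict String Int :=
  match pvWinner M S p with
  | some k => w.insert (friends.getD k "") (w.getD (friends.getD k "") 0 + 1)
  | none => w

-- the simulation invariant between A's (matrix, score) and B's (pair, net)
structure PvBridge (friends : List String) (M : List (List Int)) (S : List Int)
    (P : PySem.Dict (String × String) Int) (N : PySem.Dict String Int) : Prop where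
  lenM : M.length = friends.length
  lenS : S.length = friends.length
  rows : ∀ r ∈ M, r.length = friends.length
  keysN : N.keys = friends
  pairEq : ∀ i j, i < friends.length → j < friends.length →
    pvG M i j = P.getD (friends.getD i "", friends.getD j "") 0
  netEq : ∀ i, i < friends.length → pvS S i = N.getD (friends.getD i "") 0

theorem pvWin_asymm (M : List (List Int)) (S : List Int) (i j : Nat)
    (h : pvWin M S i j = true) : pvWin M S j i = false := by
  unfold pvWin at *
  rw [Bool.eq_false_iff]
  simp only [ne_eq, Bool.or_eq_true, Bool.and_eq_true, decide_eq_true_eq, not_or, not_and,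
    not_lt] at *
  omega

theorem pv_map_const_pyRange {alpha : Type} (n : Nat) (x : alpha) :
    (PySem.List.pyRange 0 (n : Int) 1).map (fun _ => x) = List.replicate n x := by
  rw [PySem.List.pyRange_zero_nat, List.map_map]
  simp [Function.comp_def, List.map_const']

theorem pv_sum_ite {alpha : Type} (p : alpha → Bool) (l : List alpha) :
    (l.map (fun x => if p x then 1 else 0)).sum = l.countP p := by
  induction l with
  | nil => rfl
  | cons x xs ih => by_cases h : p x <;> simp [h, ih] <;> omega

theorem pv_presentHistory_eq (M : List (List Int)) (S : List Int) (t : Nat) :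
    presentHistory (t : Int) M S = (pvW M S M.length t : Int) := by
  unfold presentHistory pvW
  rw [PySem.List.pyRange_zero_nat, List.foldl_map]
  simp only [PySem.List.pyGetD_natCast, Nat.cast_inj]
  have hfun : (fun (result : List Int) (k : Nat) =>
      if t = k then result
      else if (M.getD t []).getD k 0 > (M.getD k []).getD t 0 then result ++ [(1 : Int)]
      else if (M.getD t []).getD k 0 < (M.getD k []).getD t 0 then result ++ [(0 : Int)]
      else if S.getD t 0 > S.getD k 0 then result ++ [(1 : Int)]
      else result ++ [(0 : Int)])
      = (fun (result : List Int) (k : Nat) =>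
        if (decide (t ≠ k)) = true then
          result ++ [if pvWin M S t k then (1 : Int) else 0] else result) := by
    funext r k
    by_cases hk : t = k
    · simp [hk]
    · simp only [hk, if_neg, ne_eq, not_false_eq_true, decide_true, if_true]
      unfold pvWin pvG pvS
      split_ifs with h1 h2 h3 h4 h5 <;> simp_all <;> omega
  rw [hfun, PySem.List.foldl_append_if, List.nil_append,
    PySem.List.sum_map_ite_one_zero, List.countP_filter]

theorem pv_countP_pvPairs (M : List (List Int)) (S : List Int) (n t : Nat) (ht : t < n) :
    (pvPairs n).countP (fun p => pvWinner M S p == some t) = pvW M S n t := by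
  unfold pvPairs pvW
  rw [List.countP_flatMap]
  set P2 := (List.range (n - (t + 1))).countP (fun k => pvWin M S t (t + 1 + k)) with hP2
  set F : Nat → Nat := fun a =>
    if a = t then P2 else if a < t ∧ pvWin M S t a then 1 else 0 with hF
  -- per-a inner counts
  have hCa : ∀ a : Nat,
      ((List.countP (fun p => pvWinner M S p == some t)) ∘
        (fun a => (List.range (n - (a + 1))).map (fun k => (a, a + 1 + k)))) a = F a := by
    intro a
    simp only [Function.comp_apply, List.countP_map, hF]
    by_cases hat : a = t
    · subst hat
      rw [if_pos rfl, hP2]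
      apply List.countP_congr
      intro k _
      simp only [Function.comp_apply]
      unfold pvWinner
      by_cases hw : pvWin M S a (a + 1 + k)
      · simp [hw]
      · have : (a + 1 + k) ≠ a := by omega
        split_ifs <;> simp_all
    · rw [if_neg hat]
      have hpt : ∀ k, ((fun p => pvWinner M S p == some t) ∘
          (fun k => (a, a + 1 + k))) k = (decide (a + 1 + k = t) && pvWin M S t a) := by
        intro k
        simp only [Function.comp_apply]
        unfold pvWinner
        by_cases h1 : pvWin M S a (a + 1 + k)
        · have h2 := pvWin_asymm M S a (a + 1 + k) h1
          simp only [h1, if_true]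
          by_cases he : a + 1 + k = t
          · subst he; simp [hat, h2]
          · simp [he] <;> omega
        · simp only [h1]
          by_cases h2 : pvWin M S (a + 1 + k) a
          · simp only [h2, if_true]
            by_cases he : a + 1 + k = t
            · subst he; simp [h2]
            · simp [he]
          · simp only [h2]
            by_cases he : a + 1 + k = t
            · subst he; simp [h2]
            · simp [he]
      rw [List.countP_congr (fun k _ => by rw [hpt k])]
      by_cases hw : pvWin M S t a
      · have hsimp : (fun k => decide (a + 1 + k = t) && pvWin M S t a)
            = (fun k => decide (a + 1 + k = t)) := by
          funext k; rw [hw, Bool.and_true]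
        rw [hsimp]
        by_cases hlt : a < t
        · rw [if_pos ⟨hlt, hw⟩]
          have heq : ∀ k ∈ List.range (n - (a + 1)),
              (decide (a + 1 + k = t)) = (k == t - (a + 1)) := by
            intro k _
            by_cases h : a + 1 + k = t <;> simp [h] <;> omega
          rw [List.countP_congr (fun k hk => by rw [heq k hk]), ← List.count, List.count_range, if_pos (by omega)]
        · rw [if_neg (by omega)]
          have heq : ∀ k ∈ List.range (n - (a + 1)), (decide (a + 1 + k = t)) = false := by
            intro k hk
            simp only [List.mem_range] at hk
            simp
            omega
          rw [List.countP_congr (fun k hk => by rw [heq k hk])]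
          simp
      · simp only [hw, Bool.and_false]
        rw [if_neg (by tauto)]
        simp
  rw [List.map_congr_left (fun a _ => hCa a)]
  -- decompose range n at t
  have hdecomp : List.range n = List.range t ++ [t] ++
      (List.range (n - (t + 1))).map (fun x => t + 1 + x) := by
    have h1 : n = (t + 1) + (n - (t + 1)) := by omega
    calc List.range n = List.range ((t + 1) + (n - (t + 1))) := by rw [← h1]
      _ = List.range (t + 1) ++ (List.range (n - (t + 1))).map (fun x => (t + 1) + x) :=
        List.range_add
      _ = List.range t ++ [t] ++ (List.range (n - (t + 1))).map (fun x => t + 1 + x) := by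
        rw [List.range_succ]
  have hA : ((List.range t).map F).sum = (List.range t).countP (fun a => pvWin M S t a) := by
    rw [List.map_congr_left (g := fun a => if pvWin M S t a then 1 else 0)]
    · exact pv_sum_ite _ _
    · intro a ha
      simp only [List.mem_range] at ha
      simp only [hF]
      rw [if_neg (by omega : ¬ a = t)]
      by_cases hw : pvWin M S t a
      · rw [if_pos ⟨ha, hw⟩, if_pos hw]
      · rw [if_neg (by tauto), if_neg hw]
  have hB : (((List.range (n - (t + 1))).map (fun x => t + 1 + x)).map F).sum = 0 := by
    rw [List.map_map, List.map_congr_left (g := fun _ => 0)]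
    · simp
    · intro x _
      simp only [Function.comp_apply, hF]
      rw [if_neg (by omega : ¬ t + 1 + x = t), if_neg (by omega : ¬ (t + 1 + x < t ∧ pvWin M S t (t + 1 + x) = true))]
  have hmid : (([t]).map F).sum = P2 := by
    simp [hF]
  have key : ((List.range n).map F).sum
      = (List.range t).countP (fun a => pvWin M S t a) + P2 := by
    rw [hdecomp, List.map_append, List.sum_append, List.map_append, List.sum_append,
      hA, hB, hmid]
    omega
  have hC : (List.range t).countP (fun b => pvWin M S t b && decide (t ≠ b))
      = (List.range t).countP (fun b => pvWin M S t b) := by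
    apply List.countP_congr
    intro b hb
    simp only [List.mem_range] at hb
    simp [show t ≠ b by omega]
  have hD : ((List.range (n - (t + 1))).map (fun x => t + 1 + x)).countP
      (fun b => pvWin M S t b && decide (t ≠ b)) = P2 := by
    rw [List.countP_map, hP2]
    apply List.countP_congr
    intro k _
    simp [show t ≠ t + 1 + k by omega]
  have hmid2 : ([t]).countP (fun b => pvWin M S t b && decide (t ≠ b)) = 0 := by
    simp
  have key2 : (List.range n).countP (fun b => pvWin M S t b && decide (t ≠ b))
      = (List.range t).countP (fun a => pvWin M S t a) + P2 := by
    rw [hdecomp, List.countP_append, List.countP_append, hC, hD, hmid2]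
    omega
  rw [key, key2]

theorem pv_mem_pvPairs (n : Nat) (p : Nat × Nat) (hp : p ∈ pvPairs n) :
    p.1 < p.2 ∧ p.2 < n := by
  unfold pvPairs at hp
  simp only [List.mem_flatMap, List.mem_map, List.mem_range] at hp
  obtain ⟨a, ha, k, hk, rfl⟩ := hp
  simp
  omega

theorem pv_getD_mem {alpha : Type} {d : alpha} {xs : List alpha} {k : Nat}
    (hk : k < xs.length) : xs.getD k d ∈ xs := by
  rw [List.getD_eq_getElem?_getD, List.getElem?_eq_getElem hk]
  exact List.getElem_mem hk

-- generic set/getD pointwise description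
theorem pv_getD_set {alpha : Type} (d : alpha) (c : List alpha) (k t : Nat) (v : alpha)
    (hk : k < c.length) :
    (c.set k v).getD t d = if t = k then v else c.getD t d := by
  by_cases h : t = k
  · subst h
    rw [if_pos rfl, List.getD_eq_getElem?_getD, List.getElem?_set_self (by omega)]
    rfl
  · rw [if_neg h, List.getD_eq_getElem?_getD, List.getElem?_set_ne (by omega),
      List.getD_eq_getElem?_getD]

-- injectivity of positional access on a Nodup list
theorem pv_f_inj {friends : List String} (hnd : friends.Nodup) {i j : Nat}
    (hi : i < friends.length) (hj : j < friends.length)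
    (h : friends.getD i "" = friends.getD j "") : i = j := by
  rw [List.getD_eq_getElem?_getD, List.getElem?_eq_getElem hi,
    List.getD_eq_getElem?_getD, List.getElem?_eq_getElem hj] at h
  simp only [Option.getD_some] at h
  exact (List.Nodup.getElem_inj_iff hnd).mp h

theorem pv_mem_exists_idx {friends : List String} {a : String} (ha : a ∈ friends) :
    ∃ i, i < friends.length ∧ friends.getD i "" = a := by
  obtain ⟨i, hi, rfl⟩ := List.mem_iff_getElem.mp ha
  exact ⟨i, hi, by rw [List.getD_eq_getElem?_getD, List.getElem?_eq_getElem hi]; rfl⟩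

-- name_map lookup at position i gives i (Nodup friends)
theorem pv_nameMap_get {friends : List String} (hnd : friends.Nodup) {i : Nat}
    (hi : i < friends.length) :
    (solutionNameMap friends).get? (friends.getD i "") = some (i : Int) := by
  unfold solutionNameMap
  have hfresh : ∀ p ∈ PySem.List.enumerate friends 0,
      (PySem.Dict.empty : PySem.Dict String Int).contains p.2 = false := by
    intro p _; exact PySem.Dict.contains_empty _
  have hnodup : ((PySem.List.enumerate friends 0).map (·.2)).Nodup := by
    rw [PySem.List.map_snd_enumerate]; exact hnd
  have hitems := PySem.Dict.items_foldl_insert_fresh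
    (l := PySem.List.enumerate friends 0) (k := (·.2)) (v := (·.1))
    (d := PySem.Dict.empty) hfresh hnodup
  apply PySem.Dict.get?_of_mem_items
  · rw [hitems, show (PySem.Dict.empty : PySem.Dict String Int).items = [] from rfl,
      List.nil_append, List.mem_map]
    refine ⟨((i : Int), friends[i]), ?_, ?_⟩
    · rw [PySem.List.mem_enumerate_iff]
      exact ⟨i, hi, by simp⟩
    · simp [List.getD_eq_getElem?_getD, List.getElem?_eq_getElem hi]
  · exact PySem.Dict.nodup_keys_foldl_insert_key (PySem.List.enumerate friends 0)
      (fun p => p.2) (fun _ p => p.1) PySem.Dict.empty PySem.Dict.nodup_keys_empty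

-- a fold of constant-0 inserts keeps every getD at 0
theorem pv_zero_fold (xs : List String) :
    ∀ (d : PySem.Dict String Int), (∀ x, d.getD x 0 = 0) →
      ∀ x, (xs.foldl (fun d name => d.insert name (0 : Int)) d).getD x 0 = 0 := by
  induction xs with
  | nil => intro d h x; exact h x
  | cons y ys ih =>
    intro d h x
    rw [List.foldl_cons]
    refine ih _ (fun z => ?_) x
    rw [PySem.Dict.getD_insert]
    split <;> [rfl; exact h z]

theorem pv_keys_zero_fold (friends : List String) (hnd : friends.Nodup) :
    (friends.foldl (fun d name => d.insert name (0 : Int)) PySem.Dict.empty).keys = friends := by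
  rw [PySem.Dict.keys_foldl_insert, PySem.Dict.keys_empty, PySem.Set.update_nil_left]
  exact PySem.Set.ofList_eq_self_of_nodup friends hnd

-- one gift preserves the bridge
theorem pv_step_bridge {friends : List String} (hnd : friends.Nodup) {g a b : String}
    {M : List (List Int)} {S : List Int}
    {P : PySem.Dict (String × String) Int} {N : PySem.Dict String Int}
    (hsplit : PySem.Str.split₀ g = [a, b]) (ha : a ∈ friends) (hb : b ∈ friends)
    (hbr : PvBridge friends M S P N) :
    PvBridge friends (solutionGiftStep (solutionNameMap friends) (M, S) g).1
      (solutionGiftStep (solutionNameMap friends) (M, S) g).2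
      (solutionAltGiftStep (P, N) g).1 (solutionAltGiftStep (P, N) g).2 := by
  obtain ⟨ia, hia, hfa⟩ := pv_mem_exists_idx ha
  obtain ⟨ib, hib, hfb⟩ := pv_mem_exists_idx hb
  have hga : (solutionNameMap friends).get? a = some (ia : Int) := by
    rw [← hfa]; exact pv_nameMap_get hnd hia
  have hgb : (solutionNameMap friends).get? b = some (ib : Int) := by
    rw [← hfb]; exact pv_nameMap_get hnd hib
  have hNa : N.contains a = true := by
    rw [PySem.Dict.contains_iff_mem_keys, hbr.keysN]; exact ha
  have hNb : N.contains b = true := by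
    rw [PySem.Dict.contains_iff_mem_keys, hbr.keysN]; exact hb
  have hsa : (N.get? a).isSome := by
    rw [← PySem.Dict.contains_eq_isSome_get?]; exact hNa
  obtain ⟨va, hva⟩ := Option.isSome_iff_exists.mp hsa
  have hNb1 : (N.insert a (va + 1)).contains b = true := by
    rw [PySem.Dict.contains_insert, hNb, Bool.or_true]
  have hsb : ((N.insert a (va + 1)).get? b).isSome := by
    rw [← PySem.Dict.contains_eq_isSome_get?]; exact hNb1
  obtain ⟨vb, hvb⟩ := Option.isSome_iff_exists.mp hsb
  have hvaD : N.getD a 0 = va := PySem.Dict.getD_of_get?_eq_some _ 0 hva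
  have hvbD : (N.insert a (va + 1)).getD b 0 = vb := PySem.Dict.getD_of_get?_eq_some _ 0 hvb
  unfold solutionGiftStep solutionAltGiftStep
  rw [hsplit]
  simp only [hga, hgb, hva, hvb]
  -- resolve the indices to Nat form
  simp only [PySem.List.pySetD_natCast, PySem.List.pyGetD_natCast]
  have hMlen := hbr.lenM
  have hSlen := hbr.lenS
  have hrow : (M.getD ia []).length = friends.length :=
    hbr.rows _ (pv_getD_mem (show ia < M.length by omega))
  constructor
  · simpa using hMlen
  · simp only [List.length_set]; exact hSlen
  · intro r hr
    simp only at hr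
    rcases List.mem_or_eq_of_mem_set hr with h | h
    · exact hbr.rows r h
    · subst h; simp only [List.length_set]; exact hrow
  · dsimp only
    rw [PySem.Dict.keys_insert_of_contains _ _ hNb1,
      PySem.Dict.keys_insert_of_contains _ _ hNa, hbr.keysN]
  · intro i j hi hj
    dsimp only
    unfold pvG
    rw [pv_getD_set [] M ia i _ (by omega)]
    have hPget : (P.insert (a, b) (P.getD (a, b) 0 + 1)).getD
        (friends.getD i "", friends.getD j "") 0
        = if i = ia ∧ j = ib then P.getD (a, b) 0 + 1
          else P.getD (friends.getD i "", friends.getD j "") 0 := by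
      rw [PySem.Dict.getD_insert]
      by_cases hij : i = ia ∧ j = ib
      · rw [if_pos hij, if_pos (by rw [hij.1, hij.2, hfa, hfb])]
      · rw [if_neg hij, if_neg ?_]
        intro hcontr
        have h1 : friends.getD i "" = a := congrArg Prod.fst hcontr
        have h2 : friends.getD j "" = b := congrArg Prod.snd hcontr
        exact hij ⟨pv_f_inj hnd hi hia (by rw [h1, hfa]),
          pv_f_inj hnd hj hib (by rw [h2, hfb])⟩
    rw [hPget]
    have hAB : pvG M ia ib = P.getD (a, b) 0 := by
      have := hbr.pairEq ia ib hia hib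
      rwa [hfa, hfb] at this
    by_cases hiia : i = ia
    · subst hiia
      rw [if_pos rfl, pv_getD_set 0 (M.getD i []) ib j _ (by omega)]
      by_cases hjib : j = ib
      · subst hjib
        rw [if_pos rfl, if_pos ⟨rfl, rfl⟩]
        unfold pvG at hAB
        rw [← hAB]
      · rw [if_neg hjib, if_neg (by tauto)]
        exact hbr.pairEq i j hi hj
    · rw [if_neg hiia, if_neg (by tauto)]
      exact hbr.pairEq i j hi hj
  · intro i hi
    dsimp only
    unfold pvS
    rw [pv_getD_set 0 _ ib i _ (by simp only [List.length_set]; omega),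
      pv_getD_set 0 S ia i _ (by omega)]
    have hSa : S.getD ia 0 = va := by
      have := hbr.netEq ia hia
      unfold pvS at this
      rw [hfa, hvaD] at this
      exact this
    have hSb : (S.set ia (S.getD ia 0 + 1)).getD ib 0 = vb := by
      rw [pv_getD_set 0 S ia ib _ (by omega), hSa]
      rw [PySem.Dict.getD_insert] at hvbD
      by_cases h : ib = ia
      · subst h
        rw [if_pos rfl]
        rw [if_pos (by rw [← hfa, ← hfb])] at hvbD
        omega
      · rw [if_neg h]
        rw [if_neg (fun hc => h (pv_f_inj hnd hib hia (by rw [hfb, hfa, hc])))] at hvbD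
        have := hbr.netEq ib hib
        unfold pvS at this
        rw [hfb, hvbD] at this
        exact this.symm ▸ this ▸ rfl
    have hget2 : ((N.insert a (va + 1)).insert b (vb - 1)).getD (friends.getD i "") 0
        = if i = ib then vb - 1 else if i = ia then va + 1
          else N.getD (friends.getD i "") 0 := by
      rw [PySem.Dict.getD_insert, PySem.Dict.getD_insert]
      by_cases h1 : i = ib
      · rw [if_pos h1, if_pos (by rw [h1, hfb])]
      · rw [if_neg h1,
          if_neg (fun hc => h1 (pv_f_inj hnd hi hib (by rw [hc, hfb])))]
        by_cases h2 : i = ia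
        · rw [if_pos h2, if_pos (by rw [h2, hfa])]
        · rw [if_neg h2,
            if_neg (fun hc => h2 (pv_f_inj hnd hi hia (by rw [hc, hfa])))]
    rw [hget2]
    by_cases h1 : i = ib
    · subst h1
      rw [if_pos rfl, if_pos rfl, hSb]
    · rw [if_neg h1, if_neg h1]
      by_cases h2 : i = ia
      · subst h2
        rw [if_pos rfl, if_pos rfl, hSa]
      · rw [if_neg h2, if_neg h2]
        exact hbr.netEq i hi

-- folding all gifts preserves the bridge
theorem pv_fold_bridge {friends : List String} (hnd : friends.Nodup) (gifts : List String)
    (hg : ∀ g ∈ gifts, (PySem.Str.split₀ g).length = 2 ∧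
      ∀ t ∈ PySem.Str.split₀ g, t ∈ friends) :
    ∀ (M : List (List Int)) (S : List Int)
      (P : PySem.Dict (String × String) Int) (N : PySem.Dict String Int),
      PvBridge friends M S P N →
      PvBridge friends
        (gifts.foldl (solutionGiftStep (solutionNameMap friends)) (M, S)).1
        (gifts.foldl (solutionGiftStep (solutionNameMap friends)) (M, S)).2
        (gifts.foldl solutionAltGiftStep (P, N)).1
        (gifts.foldl solutionAltGiftStep (P, N)).2 := by
  induction gifts with
  | nil => intro M S P N h; exact h
  | cons g gs ih =>
    intro M S P N h
    obtain ⟨hlen, hmem⟩ := hg g List.mem_cons_self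
    obtain ⟨a, b, hab⟩ : ∃ a b, PySem.Str.split₀ g = [a, b] := by
      rcases hs : PySem.Str.split₀ g with _ | ⟨x, _ | ⟨y, _ | _⟩⟩ <;> simp_all
    have ha : a ∈ friends := hmem a (by rw [hab]; simp)
    have hb : b ∈ friends := hmem b (by rw [hab]; simp)
    have hstep := pv_step_bridge hnd hab ha hb h
    simp only [List.foldl_cons]
    have hgs : ∀ g' ∈ gs, (PySem.Str.split₀ g').length = 2 ∧
        ∀ t ∈ PySem.Str.split₀ g', t ∈ friends :=
      fun g' hg' => hg g' (List.mem_cons_of_mem _ hg')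
    have := ih hgs (solutionGiftStep (solutionNameMap friends) (M, S) g).1
      (solutionGiftStep (solutionNameMap friends) (M, S) g).2
      (solutionAltGiftStep (P, N) g).1 (solutionAltGiftStep (P, N) g).2 hstep
    simpa using this

-- B's matchup body is pvStepD (via the bridge)
theorem pv_match_eq_stepD {friends : List String} (hnd : friends.Nodup)
    {M : List (List Int)} {S : List Int}
    {P : PySem.Dict (String × String) Int} {N : PySem.Dict String Int}
    (hbr : PvBridge friends M S P N) (w : PySem.Dict String Int) (i j : Nat)
    (hi : i < friends.length) (hj : j < friends.length) :
    solutionAltMatch P N (friends.getD i "") w (friends.getD j "")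
      = pvStepD friends M S w (i, j) := by
  unfold solutionAltMatch pvStepD pvWinner
  have h1 := (hbr.pairEq i j hi hj).symm
  have h2 := (hbr.pairEq j i hj hi).symm
  have h3 := (hbr.netEq i hi).symm
  have h4 := (hbr.netEq j hj).symm
  rw [h1, h2, h3, h4]
  unfold pvWin
  dsimp only
  split_ifs <;>
    first
    | rfl
    | (exfalso
       simp only [gt_iff_lt, Bool.or_eq_true, Bool.and_eq_true, decide_eq_true_eq,
         not_or, not_and, not_lt, Bool.not_eq_true, Bool.or_eq_false_iff,
         Bool.and_eq_false_iff, decide_eq_false_iff_not] at *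
       omega)

-- counting lemma for the dict fold over index pairs
theorem pv_foldl_stepD_getD {friends : List String} (hnd : friends.Nodup)
    (M : List (List Int)) (S : List Int) :
    ∀ (ps : List (Nat × Nat)) (w : PySem.Dict String Int) (t : Nat),
      t < friends.length → (∀ p ∈ ps, p.1 < friends.length ∧ p.2 < friends.length) →
      (ps.foldl (pvStepD friends M S) w).getD (friends.getD t "") 0
        = w.getD (friends.getD t "") 0
          + (ps.countP (fun p => pvWinner M S p == some t) : Int) := by
  intro ps
  induction ps with
  | nil => intro w t _ _; simp
  | cons p ps ih =>
    intro w t ht hb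
    have hp := hb p List.mem_cons_self
    rw [List.foldl_cons, List.countP_cons,
      ih (pvStepD friends M S w p) t ht (fun q hq => hb q (List.mem_cons_of_mem _ hq))]
    have hstep : (pvStepD friends M S w p).getD (friends.getD t "") 0
        = w.getD (friends.getD t "") 0
          + (if pvWinner M S p == some t then (1 : Int) else 0) := by
      unfold pvStepD
      rcases hw : pvWinner M S p with _ | k
      · simp
      · have hk : k < friends.length := by
          unfold pvWinner at hw
          split_ifs at hw <;> simp_all
        rw [PySem.Dict.getD_insert]
        by_cases h : t = k
        · subst h; simp
        · rw [if_neg (fun hc => h (pv_f_inj hnd ht hk hc))]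
          simp [beq_iff_eq, Ne.symm h]
    rw [hstep]
    by_cases h : pvWinner M S p == some t <;> simp [h] <;> try ring

-- the fold preserves the wins dict's keys
theorem pv_foldl_stepD_keys {friends : List String}
    (M : List (List Int)) (S : List Int) :
    ∀ (ps : List (Nat × Nat)) (w : PySem.Dict String Int),
      w.keys = friends → (∀ p ∈ ps, p.1 < friends.length ∧ p.2 < friends.length) →
      (ps.foldl (pvStepD friends M S) w).keys = friends := by
  intro ps
  induction ps with
  | nil => intro w h _; exact h
  | cons p ps ih =>
    intro w h hb
    have hp := hb p List.mem_cons_self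
    rw [List.foldl_cons]
    refine ih _ ?_ (fun q hq => hb q (List.mem_cons_of_mem _ hq))
    unfold pvStepD
    rcases hw : pvWinner M S p with _ | k
    · exact h
    · have hk : k < friends.length := by
        unfold pvWinner at hw
        split_ifs at hw <;> simp_all
      rw [PySem.Dict.keys_insert_of_contains, h]
      rw [PySem.Dict.contains_iff_mem_keys, h]
      exact pv_getD_mem hk

-- a list is the range-indexed map of its positional reads
theorem pv_drop_eq_map_range (xs : List String) (m : Nat) :
    xs.drop m = (List.range (xs.length - m)).map (fun k => xs.getD (m + k) "") := by
  apply List.ext_getElem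
  · simp
  · intro t h1 h2
    simp only [List.getElem_drop, List.getElem_map, List.getElem_range]
    rw [List.getD_eq_getElem?_getD, List.getElem?_eq_getElem (by simp at h1 ⊢; omega)]
    rfl

theorem pv_final_max (n : Nat) (f : Nat → Int) (hf : ∀ t, 0 ≤ f t) (L : List Int)
    (hlen : L.length = n) (hget : ∀ t < n, L.getD t 0 = f t) :
    (List.range n).foldl (fun a t => max a (f t)) 0 = PySem.List.maxD L (fun x => x) 0 := by
  have hL : L = (List.range n).map f := by
    apply List.ext_getElem
    · simp [hlen]
    · intro i h1 h2
      have hi : i < n := by simpa [hlen] using h1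
      have := hget i hi
      rw [List.getD_eq_getElem?_getD, List.getElem?_eq_getElem h1] at this
      simpa using this
  have hfold : (List.range n).foldl (fun a t => max a (f t)) 0 = L.foldl max 0 := by
    rw [hL, List.foldl_map]
  rw [hfold]
  unfold PySem.List.maxD
  rcases hm : PySem.List.max? L (fun x => x) with _ | m
  · have : L = [] := (PySem.List.max?_eq_none_iff L (fun x => x)).mp hm
    rw [this]
    rfl
  · have hmem := PySem.List.max?_mem hm
    have hmax := PySem.List.max?_isMax hm
    simp only [Option.getD_some]
    have hnn : ∀ y ∈ L, 0 ≤ y := by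
      intro y hy
      rw [hL] at hy
      simp only [List.mem_map] at hy
      obtain ⟨t, _, rfl⟩ := hy
      exact hf t
    have h1 : L.foldl max 0 ≤ m := by
      rcases PySem.List.foldl_max_mem L 0 with h | h
      · rw [h]; exact hnn m hmem
      · exact hmax _ h
    have h2 : m ≤ L.foldl max 0 := (PySem.List.le_foldl_max L 0).2 m hmem
    omega

-- B's double loop over names IS the pvPairs fold of pvStepD
theorem pv_alt_loop_eq {friends : List String} (hnd : friends.Nodup)
    {M : List (List Int)} {S : List Int}
    {P : PySem.Dict (String × String) Int} {N : PySem.Dict String Int}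
    (hbr : PvBridge friends M S P N) (w0 : PySem.Dict String Int) :
    (PySem.List.enumerate friends 0).foldl (fun w p =>
        (PySem.List.slice friends (some (p.1 + 1)) none).foldl (solutionAltMatch P N p.2) w) w0
      = (pvPairs friends.length).foldl (pvStepD friends M S) w0 := by
  rw [PySem.List.enumerate_eq_map_pyRange (d := ""), List.foldl_map]
  dsimp only
  rw [show PySem.List.len friends = ((friends.length : Nat) : Int) from rfl,
    PySem.List.pyRange_zero_nat, List.foldl_map]
  unfold pvPairs
  rw [List.foldl_flatMap]
  apply PySem.List.foldl_congr_mem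
  intro w i hi
  simp only [List.mem_range] at hi
  simp only [PySem.List.pyGetD_natCast]
  have hcast : ((i : Int) + 1) = ((i + 1 : Nat) : Int) := by push_cast; ring
  rw [hcast, PySem.List.slice_from_natCast, pv_drop_eq_map_range friends (i + 1),
    List.foldl_map, List.foldl_map]
  apply PySem.List.foldl_congr_mem
  intro w' k hk
  simp only [List.mem_range] at hk
  exact pv_match_eq_stepD hnd hbr w' i (i + 1 + k) hi (by omega)

-- ===== VERDICT (by name: the statement is the Claim_ definition above) =====
theorem solution_spec : Claim_equal_solution := by
  intro friends gifts _ hpre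
  obtain ⟨hnd, hg⟩ := hpre
  unfold Spec_solution solution solution_alt
  dsimp only
  simp only [pv_map_const_pyRange]
  set n := friends.length with hn
  -- the initial states are bridged
  have hbr0 : PvBridge friends (List.replicate n (List.replicate n (0 : Int)))
      (List.replicate n (0 : Int)) PySem.Dict.empty
      (friends.foldl (fun d name => d.insert name (0 : Int)) PySem.Dict.empty) := by
    constructor
    · simp only [List.length_replicate]; exact hn
    · simp only [List.length_replicate]; exact hn
    · intro r hr
      rw [List.eq_of_mem_replicate hr]
      simp only [List.length_replicate]; exact hn
    · exact pv_keys_zero_fold friends hnd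
    · intro i j hi hj
      rw [PySem.Dict.getD_empty]
      have hi' : i < n := by omega
      have hj' : j < n := by omega
      simp [pvG, List.getD_eq_getElem?_getD, hi', hj']
    · intro i hi
      rw [pv_zero_fold friends _ (fun x => PySem.Dict.getD_empty _ _) _]
      have hi' : i < n := by omega
      simp [pvS, List.getD_eq_getElem?_getD, hi']
  have hbr := pv_fold_bridge hnd gifts hg _ _ _ _ hbr0
  set stA := gifts.foldl (solutionGiftStep (solutionNameMap friends))
    (List.replicate n (List.replicate n (0 : Int)), List.replicate n (0 : Int)) with hstA
  set stB := gifts.foldl solutionAltGiftStep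
    (PySem.Dict.empty, friends.foldl (fun d name => d.insert name (0 : Int))
      PySem.Dict.empty) with hstB
  set M := stA.1
  set S := stA.2
  have hMlen : M.length = n := hbr.lenM
  -- A side: fold of pvW over range n
  rw [PySem.List.pyRange_zero_nat, List.foldl_map]
  simp only [pv_presentHistory_eq, hMlen]
  -- B side: the wins dict
  rw [pv_alt_loop_eq hnd hbr]
  set W := (pvPairs n).foldl (pvStepD friends M S)
    (friends.foldl (fun d name => d.insert name (0 : Int)) PySem.Dict.empty) with hW
  have hkeysW : W.keys = friends :=
    pv_foldl_stepD_keys M S (pvPairs n) _ (pv_keys_zero_fold friends hnd)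
      (fun p hp => by have := pv_mem_pvPairs n p hp; omega)
  have hWget : ∀ t < n, W.getD (friends.getD t "") 0 = ((pvW M S n t : Nat) : Int) := by
    intro t ht
    rw [hW, pv_foldl_stepD_getD hnd M S (pvPairs n) _ t ht
      (fun p hp => by have := pv_mem_pvPairs n p hp; omega),
      pv_zero_fold friends _ (fun x => PySem.Dict.getD_empty _ _) _,
      pv_countP_pvPairs M S n t ht]
    simp
  have hfr : friends = (List.range n).map (fun t => friends.getD t "") := by
    conv_lhs => rw [← List.drop_zero (l := friends), pv_drop_eq_map_range friends 0]
    rw [hn]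
    simp
  have hvals : W.values = (List.range n).map (fun t => W.getD (friends.getD t "") 0) := by
    rw [PySem.Dict.values_eq_map_keys W (by rw [hkeysW]; exact hnd) 0, hkeysW]
    conv_lhs => rw [hfr]
    rw [List.map_map]
    rfl
  refine pv_final_max n (fun t => ((pvW M S n t : Nat) : Int))
    (fun t => Int.natCast_nonneg _) W.values ?_ ?_
  · rw [hvals]; simp
  · intro t ht
    rw [hvals, PySem.List.getD_map_range (fun t => W.getD (friends.getD t "") 0) n t 0 ht]
    exact hWget t ht
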